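-- pv_equiv track=rewrite | github.com/jameshorton2486/virtual_audio | app.py | infer_device_by_patterns
-- ===== SOURCE A (Python) =====
-- def infer_device_by_patterns(
--     preferred_name: str,
--     devices: list[str],
--     required_patterns: list[tuple[str, ...]],
--     optional_patterns: list[tuple[str, ...]] | None = None,
--     excluded_terms: tuple[str, ...] = (),
-- ) -> str:
--     if preferred_name in devices:
--         return preferred_name
--
--     optional_patterns = optional_patterns or []
--     excluded = tuple(term.lower() for term in excluded_terms)
--
--     def is_excluded(device_lower: str) -> bool:
--         return any(term in device_lower for term in excluded)
--
--     def matching_score(device: str) -> tuple[int, tuple[int, int, str]] | None: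
--         device_lower = device.lower()
--         if is_excluded(device_lower):
--             return None
--
--         for index, pattern in enumerate(required_patterns):
--             if all(term in device_lower for term in pattern):
--                 return (200 - index, _device_rank_key(device))
--
--         for index, pattern in enumerate(optional_patterns):
--             if all(term in device_lower for term in pattern):
--                 return (100 - index, _device_rank_key(device))
--
--         return None
--
--     ranked: list[tuple[int, tuple[int, int, str], str]] = []
--     for device in devices:
--         score = matching_score(device)
--         if score is None:
--             continue
--         ranked.append((score[0], score[1], device))
--
--     if ranked:
--         ranked.sort(key=lambda item: (-item[0], item[1]))
--         return ranked[0][2]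
--
--     return preferred_name
--
-- def _device_rank_key(device: str) -> tuple[int, int, str]:
--     lowered = device.lower()
--     penalty = 0
--
--     if "mapper" in lowered or "primary sound capture driver" in lowered:
--         penalty += 50
--     if "pc speaker" in lowered or "speaker" in lowered:
--         penalty += 20
--     if "stereo mix" in lowered or "line in" in lowered or "internal aux" in lowered:
--         penalty += 15
--     if lowered.endswith("microph"):
--         penalty += 10
--     if "microphone" in lowered:
--         penalty -= 8
--     if "yeti" in lowered or "vb-audio" in lowered or "voicemeeter" in lowered or "cable" in lowered:
--         penalty -= 10
--
--     return (penalty, -len(device), device)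
-- ===== SOURCE B (Python) =====
-- _PENALTY_RULES = [
--     (("mapper", "primary sound capture driver"), 50),
--     (("pc speaker", "speaker"), 20),
--     (("stereo mix", "line in", "internal aux"), 15),
--     (("microphone",), -8),
--     (("yeti", "vb-audio", "voicemeeter", "cable"), -10),
-- ]
--
--
-- def _rank(device):
--     lowered = device.lower()
--     penalty = sum(p for terms, p in _PENALTY_RULES
--                   if any(t in lowered for t in terms))
--     if lowered.endswith("microph"):
--         penalty += 10
--     return (penalty, -len(device), device)
--
--
-- def infer_device_by_patterns(
--     preferred_name: str,
--     devices: list[str],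
--     required_patterns: list[tuple[str, ...]],
--     optional_patterns: list[tuple[str, ...]] | None = None,
--     excluded_terms: tuple[str, ...] = (),
-- ) -> str:
--     if preferred_name in devices:
--         return preferred_name
--
--     excluded = [t.lower() for t in excluded_terms]
--
--     def key(device):
--         lowered = device.lower()
--         if any(t in lowered for t in excluded):
--             return None
--         matches = lambda pat: all(term in lowered for term in pat)
--         i = next((i for i, p in enumerate(required_patterns) if matches(p)), None)
--         if i is not None:
--             base = i - 200
--         else:
--             j = next((j for j, p in enumerate(optional_patterns or []) if matches(p)), None)
--             if j is None:
--                 return None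
--             base = j - 100
--         return (base,) + _rank(device)
--
--     # single argmin pass: the first device with the strictly smallest key wins
--     best = None
--     for device in devices:
--         k = key(device)
--         if k is not None and (best is None or k < best[0]):
--             best = (k, device)
--
--     return preferred_name if best is None else best[1]
-- ===== Notes on version B (the rewrite author's own statement) =====
-- stated objective: alternative
-- what changed: Replaces A's build-a-ranked-list-then-stable-sort-and-take-first with a single linear argmin pass whose comparison keys are computed from a penalty rule table and library first-index searches instead of A's if-chain and indexed early-return loops.
import Mathlib
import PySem

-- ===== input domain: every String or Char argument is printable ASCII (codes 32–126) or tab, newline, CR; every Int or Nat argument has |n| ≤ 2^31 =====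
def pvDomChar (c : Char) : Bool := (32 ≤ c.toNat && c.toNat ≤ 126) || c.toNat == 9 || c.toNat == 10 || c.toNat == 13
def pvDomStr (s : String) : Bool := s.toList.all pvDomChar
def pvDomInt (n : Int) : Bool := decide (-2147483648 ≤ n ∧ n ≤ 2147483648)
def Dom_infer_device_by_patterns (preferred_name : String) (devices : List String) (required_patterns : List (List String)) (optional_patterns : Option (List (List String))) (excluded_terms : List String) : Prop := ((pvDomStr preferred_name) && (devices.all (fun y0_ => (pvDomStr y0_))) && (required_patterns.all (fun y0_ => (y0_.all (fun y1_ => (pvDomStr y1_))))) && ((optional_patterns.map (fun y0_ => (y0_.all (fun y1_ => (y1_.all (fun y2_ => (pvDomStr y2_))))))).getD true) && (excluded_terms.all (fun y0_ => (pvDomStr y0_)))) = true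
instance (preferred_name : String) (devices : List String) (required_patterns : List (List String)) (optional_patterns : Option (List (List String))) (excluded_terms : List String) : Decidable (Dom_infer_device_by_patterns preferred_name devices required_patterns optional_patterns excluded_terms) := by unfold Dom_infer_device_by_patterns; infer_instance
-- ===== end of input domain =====

-- B replaces A's build-a-ranked-list-then-stable-sort with a single argmin pass whose keys are
-- computed from a penalty rule table and first-match index lookups: simpler, no intermediate list.

-- ===== PORT A =====
-- `any(term in device_lower for term in excluded)`
def pv_is_excluded (excluded : List String) (device_lower : String) : Bool :=
  excluded.any (fun term => PySem.Str.isIn term device_lower)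

-- `_device_rank_key`
def pv_device_rank_key (device : String) : Int × Int × String :=
  let lowered := PySem.Str.lower device
  let penalty : Int := 0
  let penalty := if PySem.Str.isIn "mapper" lowered || PySem.Str.isIn "primary sound capture driver" lowered then penalty + 50 else penalty
  let penalty := if PySem.Str.isIn "pc speaker" lowered || PySem.Str.isIn "speaker" lowered then penalty + 20 else penalty
  let penalty := if PySem.Str.isIn "stereo mix" lowered || PySem.Str.isIn "line in" lowered || PySem.Str.isIn "internal aux" lowered then penalty + 15 else penalty
  let penalty := if PySem.Str.endswith lowered "microph" then penalty + 10 else penalty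
  let penalty := if PySem.Str.isIn "microphone" lowered then penalty - 8 else penalty
  let penalty := if PySem.Str.isIn "yeti" lowered || PySem.Str.isIn "vb-audio" lowered || PySem.Str.isIn "voicemeeter" lowered || PySem.Str.isIn "cable" lowered then penalty - 10 else penalty
  (penalty, -(PySem.Str.len device), device)

-- `for index, pattern in enumerate(patterns): if all(term in device_lower for term in pattern): return index`
def pv_find_pattern : List (List String) → Int → String → Option Int
  | [], _, _ => none
  | pattern :: rest, index, device_lower =>
    if pattern.all (fun term => PySem.Str.isIn term device_lower) then some index
    else pv_find_pattern rest (index + 1) device_lower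

-- `matching_score`
def pv_matching_score (required_patterns optional_patterns : List (List String)) (excluded : List String) (device : String) : Option (Int × (Int × Int × String)) :=
  let device_lower := PySem.Str.lower device
  if pv_is_excluded excluded device_lower then none
  else
    match pv_find_pattern required_patterns 0 device_lower with
    | some index => some (200 - index, pv_device_rank_key device)
    | none =>
      match pv_find_pattern optional_patterns 0 device_lower with
      | some index => some (100 - index, pv_device_rank_key device)
      | none => none

-- Python's string `<`: code-point lexicographic, written on the code-point lists (exact for every string)
def pv_chars_lt : List Char → List Char → Bool
  | [], [] => false
  | [], _ :: _ => true
  | _ :: _, [] => false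
  | a :: as, b :: bs => if a < b then true else if b < a then false else pv_chars_lt as bs

-- Python's sort key `(-item[0], item[1])` flattened to the 4-tuple (-score, penalty, -len, device-chars)
def pv_sort_key (item : Int × (Int × Int × String) × String) : Int × Int × Int × List Char :=
  (-item.1, item.2.1.1, item.2.1.2.1, item.2.1.2.2.toList)

-- Python's `<` on those 4-tuples, component by component (exact tuple comparison)
def pv_key_lt (x y : Int × Int × Int × List Char) : Bool :=
  if x.1 < y.1 then true else if y.1 < x.1 then false
  else if x.2.1 < y.2.1 then true else if y.2.1 < x.2.1 then false
  else if x.2.2.1 < y.2.2.1 then true else if y.2.2.1 < x.2.2.1 then false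
  else pv_chars_lt x.2.2.2 y.2.2.2

def infer_device_by_patterns (preferred_name : String) (devices : List String) (required_patterns : List (List String)) (optional_patterns : Option (List (List String))) (excluded_terms : List String) : String :=
  if devices.contains preferred_name then preferred_name
  else
    let optional := optional_patterns.getD []
    let excluded := excluded_terms.map (fun term => PySem.Str.lower term)
    let ranked := devices.foldl (fun acc device =>
        match pv_matching_score required_patterns optional excluded device with
        | none => acc
        | some score => acc ++ [(score.1, score.2, device)]) []
    -- `ranked.sort(key=…)`: PySem's stable sort is by definition this insertBy fold;
    -- the tuple key is compared explicitly by pv_key_lt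
    let sorted := ranked.foldl (fun acc item =>
        PySem.List.insertBy (fun a b => pv_key_lt (pv_sort_key a) (pv_sort_key b)) item acc) []
    -- `if ranked: return ranked[0][2]  /  return preferred_name`
    match sorted with
    | [] => preferred_name
    | top :: _ => top.2.2

-- ===== PORT B =====
-- `_PENALTY_RULES`
def bRules : List (List String × Int) :=
  [(["mapper", "primary sound capture driver"], 50),
   (["pc speaker", "speaker"], 20),
   (["stereo mix", "line in", "internal aux"], 15),
   (["microphone"], -8),
   (["yeti", "vb-audio", "voicemeeter", "cable"], -10)]

-- `_rank`: sum of the firing rule penalties, plus the endswith bonus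
def bRank (device : String) : Int × Int × String :=
  let lowered := PySem.Str.lower device
  let penalty := bRules.foldl
    (fun acc rule => if rule.1.any (fun t => PySem.Str.isIn t lowered) then acc + rule.2 else acc) 0
  let penalty := if PySem.Str.endswith lowered "microph" then penalty + 10 else penalty
  (penalty, -(PySem.Str.len device), device)

-- `next((i for i, p in enumerate(pats) if matches(p)), None)`, via the library first-index search
def bFirstIdx (lowered : String) (pats : List (List String)) : Option Nat :=
  pats.findIdx? (fun pat => pat.all (fun term => PySem.Str.isIn term lowered))

-- Python's `<` on the code points of two strings, `||`/`&&` form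
def bCharsLt : List Char → List Char → Bool
  | _, [] => false
  | [], _ :: _ => true
  | a :: as, b :: bs => a < b || (a == b && bCharsLt as bs)

-- Python's tuple `<` on the 4-tuple keys, `||`/`&&` form
def bLt (x y : Int × Int × Int × List Char) : Bool :=
  x.1 < y.1 || (x.1 == y.1 &&
    (x.2.1 < y.2.1 || (x.2.1 == y.2.1 &&
      (x.2.2.1 < y.2.2.1 || (x.2.2.1 == y.2.2.1 && bCharsLt x.2.2.2 y.2.2.2)))))

-- `key(device)`: None if excluded or unmatched, else `(base,) + _rank(device)` (string as its code points)
def bKey (req opt : List (List String)) (exc : List String) (device : String) : Option (Int × Int × Int × List Char) :=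
  let lowered := PySem.Str.lower device
  if exc.any (fun t => PySem.Str.isIn t lowered) then none
  else
    let base? : Option Int :=
      match bFirstIdx lowered req with
      | some i => some ((i : Int) - 200)
      | none => (bFirstIdx lowered opt).map (fun j => (j : Int) - 100)
    base?.map (fun base =>
      let r := bRank device
      (base, r.1, r.2.1, r.2.2.toList))

def infer_device_by_patterns_alt (preferred_name : String) (devices : List String) (required_patterns : List (List String)) (optional_patterns : Option (List (List String))) (excluded_terms : List String) : String :=
  if devices.contains preferred_name then preferred_name
  else
    let excluded := excluded_terms.map (fun t => PySem.Str.lower t)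
    -- single argmin pass: the first device with the strictly smallest key wins
    let best := devices.foldl (fun best device =>
        match bKey required_patterns (optional_patterns.getD []) excluded device with
        | none => best
        | some k =>
          match best with
          | none => some (k, device)
          | some b => if bLt k b.1 then some (k, device) else best) none
    match best with
    | none => preferred_name
    | some b => b.2

-- ===== PRECONDITION & SPEC =====
def Spec_infer_device_by_patterns (preferred_name : String) (devices : List String) (required_patterns : List (List String)) (optional_patterns : Option (List (List String))) (excluded_terms : List String) (out : String) : Prop := out = infer_device_by_patterns_alt preferred_name devices required_patterns optional_patterns excluded_terms
instance (preferred_name : String) (devices : List String) (required_patterns : List (List String)) (optional_patterns : Option (List (List String))) (excluded_terms : List String) (out : String) : Decidable (Spec_infer_device_by_patterns preferred_name devices required_patterns optional_patterns excluded_terms out) := by unfold Spec_infer_device_by_patterns; infer_instance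

-- ===== CLAIM (what is proved, stated in full; the proofs are below) =====
def Claim_equal_infer_device_by_patterns : Prop := ∀ (preferred_name : String) (devices : List String) (required_patterns : List (List String)) (optional_patterns : Option (List (List String))) (excluded_terms : List String), Dom_infer_device_by_patterns preferred_name devices required_patterns optional_patterns excluded_terms → Spec_infer_device_by_patterns preferred_name devices required_patterns optional_patterns excluded_terms (infer_device_by_patterns preferred_name devices required_patterns optional_patterns excluded_terms)

-- ===== LEMMAS AND PROOFS =====

-- the per-device option produced by A's scoring helper, as a triple (score0, rank_key, device)
def pv_g (required_patterns optional_patterns : List (List String)) (excluded : List String) (device : String) : Option (Int × (Int × Int × String) × String) :=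
  (pv_matching_score required_patterns optional_patterns excluded device).map (fun score => (score.1, score.2, device))

-- the strict-argmin step on triples
def pv_step (b : Option (Int × (Int × Int × String) × String)) (t : Int × (Int × Int × String) × String) : Option (Int × (Int × Int × String) × String) :=
  match b with
  | none => some t
  | some q => if pv_key_lt (pv_sort_key t) (pv_sort_key q) then some t else b

-- state mapping from B's (key, device) pair state to the triple state
def pv_e (t : Int × (Int × Int × String) × String) : (Int × Int × Int × List Char) × String :=
  (pv_sort_key t, t.2.2)

-- B's comparators agree with A's
theorem bCharsLt_eq : ∀ (x y : List Char), bCharsLt x y = pv_chars_lt x y := by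
  intro x
  induction x with
  | nil => intro y; cases y <;> rfl
  | cons a as ih =>
    intro y
    cases y with
    | nil => rfl
    | cons b bs =>
      simp only [bCharsLt, pv_chars_lt, ih]
      by_cases h1 : a < b
      · simp [h1]
      · by_cases h2 : b < a
        · have : a ≠ b := fun h => by subst h; exact h2.not_gt h2
          simp [h1, h2, this]
        · have : a = b := le_antisymm (not_lt.mp h2) (not_lt.mp h1)
          simp [h1, h2, this]

theorem bLt_eq : ∀ (x y : Int × Int × Int × List Char), bLt x y = pv_key_lt x y := by
  intro x y
  simp only [bLt, pv_key_lt, bCharsLt_eq]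
  by_cases h1 : x.1 < y.1
  · simp [h1]
  · by_cases h1' : y.1 < x.1
    · have : x.1 ≠ y.1 := fun h => by rw [h] at h1'; exact h1'.not_gt h1'
      simp [h1, h1', this]
    · have e1 : x.1 = y.1 := le_antisymm (not_lt.mp h1') (not_lt.mp h1)
      by_cases h2 : x.2.1 < y.2.1
      · simp [h1, h1', e1, h2]
      · by_cases h2' : y.2.1 < x.2.1
        · have : x.2.1 ≠ y.2.1 := fun h => by rw [h] at h2'; exact h2'.not_gt h2'
          simp [h1, h1', e1, h2, h2', this]
        · have e2 : x.2.1 = y.2.1 := le_antisymm (not_lt.mp h2') (not_lt.mp h2)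
          by_cases h3 : x.2.2.1 < y.2.2.1
          · simp [h1, h1', e1, h2, h2', e2, h3]
          · by_cases h3' : y.2.2.1 < x.2.2.1
            · have : x.2.2.1 ≠ y.2.2.1 := fun h => by rw [h] at h3'; exact h3'.not_gt h3'
              simp [h1, h1', e1, h2, h2', e2, h3, h3', this]
            · have e3 : x.2.2.1 = y.2.2.1 := le_antisymm (not_lt.mp h3') (not_lt.mp h3)
              simp [h1, h1', e1, h2, h2', e2, h3, h3', e3]

-- the two penalty accumulations (rule-table order vs if-chain order) agree, over abstract conditions
theorem pen_swap2 (c1 c2 c3 cm cc d1 d2 d3 dm dc ce : Bool)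
    (h1 : c1 = d1) (h2 : c2 = d2) (h3 : c3 = d3) (hm : cm = dm) (hc : cc = dc) :
    (let p0 : Int := 0
     let p1 := if c1 then p0 + 50 else p0
     let p2 := if c2 then p1 + 20 else p1
     let p3 := if c3 then p2 + 15 else p2
     let p4 := if cm then p3 + -8 else p3
     let p5 := if cc then p4 + -10 else p4
     if ce then p5 + 10 else p5)
  = (let q0 : Int := 0
     let q1 := if d1 then q0 + 50 else q0
     let q2 := if d2 then q1 + 20 else q1
     let q3 := if d3 then q2 + 15 else q2
     let q4 := if ce then q3 + 10 else q3
     let q5 := if dm then q4 - 8 else q4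
     if dc then q5 - 10 else q5) := by
  subst h1 h2 h3 hm hc
  cases c1 <;> cases c2 <;> cases c3 <;> cases cm <;> cases cc <;> cases ce <;> decide

-- B's rule-table rank equals A's if-chain rank key
theorem bRank_eq (device : String) : bRank device = pv_device_rank_key device := by
  unfold bRank pv_device_rank_key bRules
  exact congrArg (fun p => (p, -(PySem.Str.len device), device))
    (pen_swap2 _ _ _ _ _ _ _ _ _ _ _
      (by simp) (by simp) (by simp [Bool.or_assoc]) (by simp) (by simp [Bool.or_assoc]))

-- B's first-index search equals A's indexed recursion
theorem bFirstIdx_eq (lowered : String) :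
    ∀ (pats : List (List String)) (k : Int),
    pv_find_pattern pats k lowered
      = (bFirstIdx lowered pats).map (fun n => k + (n : Int)) := by
  intro pats
  induction pats with
  | nil => intro k; rfl
  | cons p rest ih =>
    intro k
    simp only [pv_find_pattern, bFirstIdx, List.findIdx?_cons]
    cases h : p.all (fun term => PySem.Str.isIn term lowered) with
    | true => simp [h]
    | false =>
      simp only [h, Bool.false_eq_true, if_false]
      rw [ih (k + 1)]
      simp only [bFirstIdx]
      cases List.findIdx? (fun pat => pat.all (fun term => PySem.Str.isIn term lowered)) rest with
      | none => simp
      | some n => simp; omega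

-- B's key is A's score through the sort-key flattening
theorem bKey_eq (req opt : List (List String)) (exc : List String) (device : String) :
    bKey req opt exc device
      = (pv_matching_score req opt exc device).map (fun s => pv_sort_key (s.1, s.2, device)) := by
  unfold bKey pv_matching_score pv_is_excluded
  cases hexc : exc.any (fun t => PySem.Str.isIn t (PySem.Str.lower device)) with
  | true => simp only [hexc]; simp
  | false =>
    simp only [hexc, Bool.false_eq_true, if_false]
    rw [bFirstIdx_eq, bFirstIdx_eq]
    cases bFirstIdx (PySem.Str.lower device) req with
    | some i =>
      simp [bRank_eq, pv_sort_key]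
      try omega
    | none =>
      simp only [Option.map_none]
      cases bFirstIdx (PySem.Str.lower device) opt with
      | some j =>
        simp [bRank_eq, pv_sort_key]
        try omega
      | none => simp

-- A's ranked-building fold is filterMap
theorem pv_ranked_eq (req opt : List (List String)) (exc : List String) :
    ∀ (xs : List String) (acc : List (Int × (Int × Int × String) × String)),
    xs.foldl (fun acc device =>
        match pv_matching_score req opt exc device with
        | none => acc
        | some score => acc ++ [(score.1, score.2, device)]) acc
      = acc ++ xs.filterMap (pv_g req opt exc) := by
  intro xs
  induction xs with
  | nil => intro acc; simp [List.filterMap]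
  | cons d rest ih =>
    intro acc
    simp only [List.foldl_cons, List.filterMap_cons]
    cases h : pv_matching_score req opt exc d with
    | none => simp [pv_g, h, ih]
    | some s => simp [pv_g, h, ih]

-- B's fold is the strict-argmin fold over the same filterMap, through the state map pv_e
theorem pv_best_eq (req opt : List (List String)) (exc : List String) :
    ∀ (xs : List String) (b : Option (Int × (Int × Int × String) × String)),
    xs.foldl (fun best device =>
        match bKey req opt exc device with
        | none => best
        | some k =>
          match best with
          | none => some (k, device)
          | some b => if bLt k b.1 then some (k, device) else best) (b.map pv_e)
      = ((xs.filterMap (pv_g req opt exc)).foldl pv_step b).map pv_e := by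
  intro xs
  induction xs with
  | nil => intro b; simp [List.filterMap]
  | cons d rest ih =>
    intro b
    simp only [List.foldl_cons, List.filterMap_cons]
    have hk := bKey_eq req opt exc d
    cases h : pv_matching_score req opt exc d with
    | none =>
      rw [h] at hk
      simpa [pv_g, h, hk] using ih b
    | some s =>
      rw [h] at hk
      cases b with
      | none =>
        simpa [pv_g, h, hk, pv_step, pv_e] using ih (some (s.1, s.2, d))
      | some q =>
        by_cases hlt : pv_key_lt (pv_sort_key (s.1, s.2, d)) (pv_sort_key q) = true
        · simpa [pv_g, h, hk, pv_step, pv_e, bLt_eq, hlt] using ih (some (s.1, s.2, d))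
        · simpa [pv_g, h, hk, pv_step, pv_e, bLt_eq, hlt] using ih (some q)

-- the head of the stable insertion sort is the first element with strictly smallest key
theorem pv_head_sorted_eq_argmin (l : List (Int × (Int × Int × String) × String)) :
    (l.foldl (fun acc item =>
        PySem.List.insertBy (fun a b => pv_key_lt (pv_sort_key a) (pv_sort_key b)) item acc) []).head?
      = l.foldl pv_step none := by
  induction l using List.reverseRecOn with
  | nil => rfl
  | append_singleton xs x ih =>
    rw [List.foldl_append, List.foldl_append]
    simp only [List.foldl_cons, List.foldl_nil]
    cases hS : xs.foldl (fun acc item =>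
        PySem.List.insertBy (fun a b => pv_key_lt (pv_sort_key a) (pv_sort_key b)) item acc) [] with
    | nil =>
      rw [hS] at ih
      simp only [List.head?] at ih
      rw [← ih]
      rfl
    | cons h t =>
      rw [hS] at ih
      simp only [List.head?] at ih
      rw [← ih]
      simp only [PySem.List.insertBy, pv_step]
      by_cases hlt : pv_key_lt (pv_sort_key x) (pv_sort_key h) = true
      · simp [hlt]
      · simp [hlt]

-- the else-branches of the two ports agree
theorem pv_main (req opt : List (List String)) (exc : List String) (devices : List String) (pref : String) :
    (match (devices.foldl (fun acc device =>
        match pv_matching_score req opt exc device with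
        | none => acc
        | some score => acc ++ [(score.1, score.2, device)]) []).foldl (fun acc item =>
        PySem.List.insertBy (fun a b => pv_key_lt (pv_sort_key a) (pv_sort_key b)) item acc) [] with
     | [] => pref
     | top :: _ => top.2.2)
    = (match devices.foldl (fun best device =>
        match bKey req opt exc device with
        | none => best
        | some k =>
          match best with
          | none => some (k, device)
          | some b => if bLt k b.1 then some (k, device) else best) none with
       | none => pref
       | some b => b.2) := by
  rw [pv_ranked_eq, List.nil_append]
  have hb := pv_best_eq req opt exc devices none
  simp only [Option.map_none] at hb
  rw [hb]
  have hh := pv_head_sorted_eq_argmin (devices.filterMap (pv_g req opt exc))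
  cases hc : (devices.filterMap (pv_g req opt exc)).foldl pv_step none with
  | none =>
    rw [hc] at hh
    cases hs : (devices.filterMap (pv_g req opt exc)).foldl (fun acc item =>
        PySem.List.insertBy (fun a b => pv_key_lt (pv_sort_key a) (pv_sort_key b)) item acc) [] with
    | nil => simp
    | cons top rest => rw [hs] at hh; simp at hh
  | some t =>
    rw [hc] at hh
    cases hs : (devices.filterMap (pv_g req opt exc)).foldl (fun acc item =>
        PySem.List.insertBy (fun a b => pv_key_lt (pv_sort_key a) (pv_sort_key b)) item acc) [] with
    | nil => rw [hs] at hh; simp at hh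
    | cons top rest =>
      rw [hs] at hh
      simp only [List.head?, Option.some.injEq] at hh
      subst hh
      simp [pv_e]

-- ===== VERDICT (by name: the statement is the Claim_ definition above) =====
theorem infer_device_by_patterns_spec : Claim_equal_infer_device_by_patterns := by
  intro preferred_name devices required_patterns optional_patterns excluded_terms _
  unfold Spec_infer_device_by_patterns infer_device_by_patterns infer_device_by_patterns_alt
  split_ifs with hmem
  · rfl
  · exact pv_main required_patterns (optional_patterns.getD [])
      (excluded_terms.map (fun term => PySem.Str.lower term)) devices preferred_name
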